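-- pv_equiv track=rewrite | github.com/Mercury7353/PyBench | utils/calculate_avg_step.py | count_elements_in_intervals
-- ===== SOURCE A (Python) =====
-- def count_elements_in_intervals(elements):
--     # 定义区间
--     intervals = {'<=2': 0, '[4,6]': 0, '[7,9]': 0, '>=10': 0}
--
--     for element in elements:
--         if element <= 3:
--             intervals['<=2'] += 1
--         elif 4 <= element <= 6:
--             intervals['[4,6]'] += 1
--         elif 7 <= element <= 9:
--             intervals['[7,9]'] += 1
--         elif element >= 10:
--             intervals['>=10'] += 1
--
--     return intervals
-- ===== SOURCE B (Python) =====
-- def count_elements_in_intervals(elements):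
--     return {
--         '<=2': sum(1 for e in elements if e <= 3),
--         '[4,6]': sum(1 for e in elements if 4 <= e <= 6),
--         '[7,9]': sum(1 for e in elements if 7 <= e <= 9),
--         '>=10': sum(1 for e in elements if e >= 10),
--     }
-- ===== Notes on version B (the rewrite author's own statement) =====
-- stated objective: simpler
-- what changed: Replaces the single stateful loop with an if/elif chain mutating a dict by four independent count passes, one per bucket, assembled directly into the result dict.
import Mathlib
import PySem

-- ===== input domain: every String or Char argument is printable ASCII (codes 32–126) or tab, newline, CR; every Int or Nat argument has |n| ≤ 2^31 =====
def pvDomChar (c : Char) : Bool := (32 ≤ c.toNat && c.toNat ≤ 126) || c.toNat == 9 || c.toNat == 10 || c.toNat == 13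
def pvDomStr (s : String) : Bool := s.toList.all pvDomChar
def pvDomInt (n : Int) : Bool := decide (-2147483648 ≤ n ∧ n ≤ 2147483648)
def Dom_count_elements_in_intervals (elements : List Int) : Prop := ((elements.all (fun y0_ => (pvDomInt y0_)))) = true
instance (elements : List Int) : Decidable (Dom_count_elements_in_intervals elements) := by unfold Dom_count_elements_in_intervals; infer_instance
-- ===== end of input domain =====

-- ===== PORT A =====
def count_elements_in_intervals (elements : List Int) : List (String × Int) :=
  let d0 : PySem.Dict String Int :=
    (((PySem.Dict.empty.insert "<=2" 0).insert "[4,6]" 0).insert "[7,9]" 0).insert ">=10" 0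
  (elements.foldl (fun d element =>
      if element ≤ 3 then d.modify "<=2" 0 (· + 1)
      else if 4 ≤ element ∧ element ≤ 6 then d.modify "[4,6]" 0 (· + 1)
      else if 7 ≤ element ∧ element ≤ 9 then d.modify "[7,9]" 0 (· + 1)
      else if element ≥ 10 then d.modify ">=10" 0 (· + 1)
      else d) d0).items

-- ===== PORT B =====
-- B: four independent per-bucket count passes assembled directly into the dict (simpler decomposition, same cost)
def count_elements_in_intervals_alt (elements : List Int) : List (String × Int) :=
  [("<=2",  (elements.countP (fun e => e ≤ 3) : Int)),
   ("[4,6]", (elements.countP (fun e => 4 ≤ e ∧ e ≤ 6) : Int)),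
   ("[7,9]", (elements.countP (fun e => 7 ≤ e ∧ e ≤ 9) : Int)),
   (">=10", (elements.countP (fun e => e ≥ 10) : Int))]

-- ===== PRECONDITION & SPEC =====
def Spec_count_elements_in_intervals (elements : List Int) (out : List (String × Int)) : Prop := out = count_elements_in_intervals_alt elements
instance (elements : List Int) (out : List (String × Int)) : Decidable (Spec_count_elements_in_intervals elements out) := by unfold Spec_count_elements_in_intervals; infer_instance

-- ===== CLAIM (what is proved, stated in full; the proofs are below) =====
def Claim_equal_count_elements_in_intervals : Prop := ∀ (elements : List Int), Dom_count_elements_in_intervals elements → Spec_count_elements_in_intervals elements (count_elements_in_intervals elements)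

-- ===== LEMMAS AND PROOFS =====

lemma cei_foldl (els : List Int) (a b c d : Int) :
    (els.foldl (fun d element =>
      if element ≤ 3 then d.modify "<=2" 0 (· + 1)
      else if 4 ≤ element ∧ element ≤ 6 then d.modify "[4,6]" 0 (· + 1)
      else if 7 ≤ element ∧ element ≤ 9 then d.modify "[7,9]" 0 (· + 1)
      else if element ≥ 10 then d.modify ">=10" 0 (· + 1)
      else d) (PySem.Dict.mk [("<=2",a),("[4,6]",b),("[7,9]",c),(">=10",d)])).items
    = [("<=2",  a + (els.countP (fun e => e ≤ 3) : Int)),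
       ("[4,6]", b + (els.countP (fun e => 4 ≤ e ∧ e ≤ 6) : Int)),
       ("[7,9]", c + (els.countP (fun e => 7 ≤ e ∧ e ≤ 9) : Int)),
       (">=10", d + (els.countP (fun e => e ≥ 10) : Int))] := by
  induction els generalizing a b c d with
  | nil => simp
  | cons e t ih =>
    simp only [List.foldl_cons, List.countP_cons]
    by_cases h1 : e ≤ 3
    · have hm : (PySem.Dict.mk [("<=2",a),("[4,6]",b),("[7,9]",c),(">=10",d)]).modify "<=2" 0 (· + 1)
           = PySem.Dict.mk [("<=2",a+1),("[4,6]",b),("[7,9]",c),(">=10",d)] := by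
        simp [PySem.Dict.modify, PySem.Dict.insert, PySem.Dict.getD, PySem.Dict.get?]
      have h2 : ¬ (4 ≤ e ∧ e ≤ 6) := by omega
      have h3 : ¬ (7 ≤ e ∧ e ≤ 9) := by omega
      have h4 : ¬ (e ≥ 10) := by omega
      rw [if_pos h1, hm, ih]
      simp [h1, h2, h3, h4]; ring
    · by_cases h2 : 4 ≤ e ∧ e ≤ 6
      · have hm : (PySem.Dict.mk [("<=2",a),("[4,6]",b),("[7,9]",c),(">=10",d)]).modify "[4,6]" 0 (· + 1)
             = PySem.Dict.mk [("<=2",a),("[4,6]",b+1),("[7,9]",c),(">=10",d)] := by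
          simp [PySem.Dict.modify, PySem.Dict.insert, PySem.Dict.getD, PySem.Dict.get?]
        have h3 : ¬ (7 ≤ e ∧ e ≤ 9) := by omega
        have h4 : ¬ (e ≥ 10) := by omega
        rw [if_neg h1, if_pos h2, hm, ih]
        simp [h1, h2, h3, h4]; ring
      · by_cases h3 : 7 ≤ e ∧ e ≤ 9
        · have hm : (PySem.Dict.mk [("<=2",a),("[4,6]",b),("[7,9]",c),(">=10",d)]).modify "[7,9]" 0 (· + 1)
               = PySem.Dict.mk [("<=2",a),("[4,6]",b),("[7,9]",c+1),(">=10",d)] := by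
            simp [PySem.Dict.modify, PySem.Dict.insert, PySem.Dict.getD, PySem.Dict.get?]
          have h4 : ¬ (e ≥ 10) := by omega
          rw [if_neg h1, if_neg h2, if_pos h3, hm, ih]
          simp [h1, h2, h3, h4]; ring
        · have h4 : e ≥ 10 := by omega
          have hm : (PySem.Dict.mk [("<=2",a),("[4,6]",b),("[7,9]",c),(">=10",d)]).modify ">=10" 0 (· + 1)
               = PySem.Dict.mk [("<=2",a),("[4,6]",b),("[7,9]",c),(">=10",d+1)] := by
            simp [PySem.Dict.modify, PySem.Dict.insert, PySem.Dict.getD, PySem.Dict.get?]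
          rw [if_neg h1, if_neg h2, if_neg h3, if_pos h4, hm, ih]
          simp [h1, h2, h3, h4]; ring

-- ===== VERDICT (by name: the statement is the Claim_ definition above) =====
theorem count_elements_in_intervals_spec : Claim_equal_count_elements_in_intervals := by
  intro els _
  show _ = _
  unfold count_elements_in_intervals count_elements_in_intervals_alt
  have h0 : (((PySem.Dict.empty.insert "<=2" (0:Int)).insert "[4,6]" 0).insert "[7,9]" 0).insert ">=10" 0
      = PySem.Dict.mk [("<=2",0),("[4,6]",0),("[7,9]",0),(">=10",0)] := by decide
  rw [h0, cei_foldl]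
  simp
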